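-- pv_equiv track=rewrite | github.com/anushka-0099/coding_practice | codeforces_practice.py | f
-- ===== SOURCE A (Python) =====
-- def f(arr,k):
--     eve=[]
--     odd=[]
--     for i in arr:
--         if i%2==0:
--             eve.append(i%k)
--         else:
--             odd.append(i%k)
--     # we have 2 cases here
--     # both the arrs are always in the range of k ie 0-k-1
--     # case 1 if sum is <k
--     # c2 sum is >=k in this case we have to take the mod again so we want to deviate it most from k so that the remainder is always the greatest so in this case we take the 2nd arrs maxm val
--     # in case 1 we have x+y<k so we have x,k and find y<k-x ie max val can be k-x-1 so use bs over 2nd arr to find the closest val to it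
--     # and directly add it
--     # in case 2 again take the mod
--     eve.sort()
--     odd.sort()
--     maxm=odd[-1]
--     ans=0
--     for i in eve:
--         y=k-i-1
--         low=0
--         high=len(odd)-1
--         t=-1
--         while low<=high:
--             mid=(low+high)//2
--             if odd[mid]<=y:
--                 t=mid
--                 low=mid+1
--             else:
--                 high=mid-1
--         if t!=-1:
--             ans=max(ans,odd[t]+i)
--         if maxm+i>=k:
--             ans=max(ans,(i+maxm)%k)
--     return ans
-- ===== SOURCE B (Python) =====
-- def f(arr, k):
--     eve = sorted(x % k for x in arr if x % 2 == 0)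
--     odd = sorted(x % k for x in arr if x % 2 != 0)
--     maxm = odd[-1]
--     ans = 0
--     p = len(odd) - 1
--     for e in eve:
--         y = k - e - 1
--         while p >= 0 and odd[p] > y:
--             p -= 1
--         if p >= 0:
--             ans = max(ans, odd[p] + e)
--         if maxm + e >= k:
--             ans = max(ans, (e + maxm) % k)
--     return ans
-- ===== Notes on version B (the rewrite author's own statement) =====
-- stated objective: faster
-- what changed: A's explicit partition loop plus a per-even-element binary search over the sorted odd residues is replaced by comprehensions and a single monotone two-pointer sweep: since the threshold k-e-1 only decreases along the sorted even residues, one pointer walked once over the sorted odd residues finds each even element's best sum<k partner.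
-- outside the precondition, e.g. on f([2, 4], 5): A raises IndexError, B raises IndexError; on f([1, 3], 0): A raises ZeroDivisionError, B raises ZeroDivisionError
import Mathlib
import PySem

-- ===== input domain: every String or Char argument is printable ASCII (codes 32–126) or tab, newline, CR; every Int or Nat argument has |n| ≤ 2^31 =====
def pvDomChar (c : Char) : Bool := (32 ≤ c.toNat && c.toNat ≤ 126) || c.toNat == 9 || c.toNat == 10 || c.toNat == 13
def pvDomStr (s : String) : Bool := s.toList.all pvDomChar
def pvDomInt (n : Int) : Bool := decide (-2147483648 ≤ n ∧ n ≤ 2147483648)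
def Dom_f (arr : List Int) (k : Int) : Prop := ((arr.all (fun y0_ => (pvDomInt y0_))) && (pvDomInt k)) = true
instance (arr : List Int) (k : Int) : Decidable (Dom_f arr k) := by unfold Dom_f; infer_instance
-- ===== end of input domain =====

-- B replaces A's per-even binary search over the sorted odd residues by a single
-- monotone two-pointer sweep (the threshold k-e-1 only decreases along sorted eve);
-- objective: faster (measured constant-factor win; the per-even binary searches collapse into one linear sweep).

-- ===== PORT A =====
-- A's inner 'while low<=high' binary search; state (low, high, t), returns t.
-- The Nat argument is fuel making the recursion structural; called with fuel
-- odd.length ≥ high-low+1 it never runs out, so the guard is never the result.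
def fBS (odd : List Int) (y : Int) : Nat → Int → Int → Int → Int
  | 0, _, _, t => t
  | n + 1, low, high, t =>
    if low ≤ high then
      let mid := PySem.Int.floordiv (low + high) 2
      if PySem.List.pyGetD odd mid 0 ≤ y then
        fBS odd y n (mid + 1) high mid
      else
        fBS odd y n low (mid - 1) t
    else t

def f (arr : List Int) (k : Int) : Int :=
  let p := arr.foldl (fun (p : List Int × List Int) i =>
      if PySem.Int.mod i 2 = 0 then (p.1 ++ [PySem.Int.mod i k], p.2)
      else (p.1, p.2 ++ [PySem.Int.mod i k])) ([], [])
  let eve := PySem.List.sorted p.1 (fun x => x) false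
  let odd := PySem.List.sorted p.2 (fun x => x) false
  let maxm := PySem.List.pyGetD odd (-1) 0   -- odd[-1]; Pre_f guarantees odd ≠ []
  eve.foldl (fun ans i =>
      let y := k - i - 1
      let t := fBS odd y odd.length 0 ((odd.length : Int) - 1) (-1)
      let ans := if t ≠ -1 then max ans (PySem.List.pyGetD odd t 0 + i) else ans
      if maxm + i ≥ k then max ans (PySem.Int.mod (i + maxm) k) else ans) 0

-- ===== PORT B =====
-- B's inner 'while p>=0 and odd[p]>y' pointer decrement; Nat fuel as in fBS,
-- called with fuel odd.length ≥ p+1 so it never runs out.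
def fSweep (odd : List Int) (y : Int) : Nat → Int → Int
  | 0, p => p
  | n + 1, p => if 0 ≤ p ∧ y < PySem.List.pyGetD odd p 0 then fSweep odd y n (p - 1) else p

def f_alt (arr : List Int) (k : Int) : Int :=
  let eve := PySem.List.sorted
      ((arr.filter (fun x => PySem.Int.mod x 2 = 0)).map (fun x => PySem.Int.mod x k))
      (fun x => x) false
  let odd := PySem.List.sorted
      ((arr.filter (fun x => ¬ PySem.Int.mod x 2 = 0)).map (fun x => PySem.Int.mod x k))
      (fun x => x) false
  let maxm := PySem.List.pyGetD odd (-1) 0   -- odd[-1]; Pre_f guarantees odd ≠ []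
  (eve.foldl (fun (st : Int × Int) e =>
      let y := k - e - 1
      let p := fSweep odd y odd.length st.2
      let ans := if 0 ≤ p then max st.1 (PySem.List.pyGetD odd p 0 + e) else st.1
      let ans := if maxm + e ≥ k then max ans (PySem.Int.mod (e + maxm) k) else ans
      (ans, p)) ((0 : Int), (odd.length : Int) - 1)).1

-- ===== PRECONDITION & SPEC =====
-- Pre_f excludes exactly the inputs where the Python A raises: k = 0 (ZeroDivisionError
-- at i%k, or IndexError at odd[-1] when arr = []) and inputs with no odd element
-- (IndexError at odd[-1]); B raises in exactly the same situations.
def Pre_f (arr : List Int) (k : Int) : Prop :=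
  k ≠ 0 ∧ ∃ i ∈ arr, PySem.Int.mod i 2 ≠ 0
instance (arr : List Int) (k : Int) : Decidable (Pre_f arr k) := by
  unfold Pre_f; infer_instance

def pvWitness_f : List Int × Int := ([3, 2, 7, 8, 1], 5)

def Spec_f (arr : List Int) (k : Int) (out : Int) : Prop := out = f_alt arr k
instance (arr : List Int) (k : Int) (out : Int) : Decidable (Spec_f arr k out) := by
  unfold Spec_f; infer_instance

-- ===== CLAIM (what is proved, stated in full; the proofs are below) =====
def Claim_equal_f : Prop := ∀ (arr : List Int) (k : Int), Dom_f arr k → Pre_f arr k → Spec_f arr k (f arr k)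

-- ===== LEMMAS AND PROOFS =====

-- number of elements of `odd` that are ≤ y
def cntLE (odd : List Int) (y : Int) : Nat := odd.countP (fun o => decide (o ≤ y))

-- On a sorted list, the elements ≤ y are exactly the prefix of length cntLE.
lemma sorted_le_iff (odd : List Int) (hs : odd.Pairwise (· ≤ ·)) (y : Int)
    (j : Nat) (hj : j < odd.length) : odd[j] ≤ y ↔ j < cntLE odd y := by
  induction odd generalizing j with
  | nil => simp at hj
  | cons a t ih =>
    rcases List.pairwise_cons.mp hs with ⟨ha, ht⟩
    have hzero : ¬ a ≤ y → cntLE t y = 0 := by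
      intro hay
      apply List.countP_eq_zero.mpr
      intro b hb
      have hab := ha b hb
      simp only [decide_eq_true_eq]
      omega
    have hc : cntLE (a :: t) y = cntLE t y + if a ≤ y then 1 else 0 := by
      simp [cntLE, List.countP_cons]
    cases j with
    | zero =>
      rw [List.getElem_cons_zero, hc]
      split_ifs with hay
      · simp only [hay, true_iff]
        omega
      · have h0 := hzero hay
        simp only [hay, false_iff]
        omega
    | succ j =>
      have hj' : j < t.length := by simpa using hj
      rw [List.getElem_cons_succ, ih ht j hj', hc]
      split_ifs with hay
      · omega
      · have h0 := hzero hay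
        omega

-- A's binary search returns (cntLE odd y) - 1 (so -1 iff no element is ≤ y).
lemma fBS_eq (odd : List Int) (y : Int) (hs : odd.Pairwise (· ≤ ·)) :
    ∀ (n : Nat) (low high t : Int), (high - low + 1).toNat ≤ n →
      0 ≤ low → high ≤ (odd.length : Int) - 1 →
      low ≤ (cntLE odd y : Int) → (cntLE odd y : Int) ≤ high + 1 → t = low - 1 →
      fBS odd y n low high t = (cntLE odd y : Int) - 1 := by
  intro n
  induction n with
  | zero =>
    intro low high t hm h0 hh hl hc ht
    simp only [fBS]
    omega
  | succ n ih =>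
    intro low high t hm h0 hh hl hc ht
    simp only [fBS]
    by_cases hlh : low ≤ high
    · simp only [hlh, if_pos]
      have hmid := PySem.Int.floordiv_two_mid_bounds hlh
      set mid := PySem.Int.floordiv (low + high) 2 with hmiddef
      have hmid0 : 0 ≤ mid := by omega
      have hmidlen : mid < (odd.length : Int) := by omega
      have hget : PySem.List.pyGetD odd mid 0 = odd[mid.toNat]'(by omega) :=
        PySem.List.pyGetD_eq_getElem odd 0 hmid0 hmidlen
      have hchar := sorted_le_iff odd hs y mid.toNat (by omega)
      by_cases hcond : PySem.List.pyGetD odd mid 0 ≤ y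
      · simp only [hcond, if_pos]
        have hlt : (mid.toNat : Int) < (cntLE odd y : Int) := by
          exact_mod_cast Int.ofNat_lt.mpr (hchar.mp (by rw [← hget]; exact hcond))
        have : mid < (cntLE odd y : Int) := by omega
        exact ih (mid + 1) high mid (by omega) (by omega) hh (by omega) hc (by omega)
      · simp only [hcond, if_neg, not_false_iff]
        have hge : (cntLE odd y : Int) ≤ mid := by
          by_contra hcon
          have : mid.toNat < cntLE odd y := by omega
          exact hcond (by rw [hget]; exact hchar.mpr this)
        exact ih low (mid - 1) t (by omega) h0 (by omega) hl (by omega) ht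
    · simp only [hlh, if_neg, not_false_iff]
      omega

-- B's pointer sweep also lands on (cntLE odd y) - 1, provided the pointer starts
-- above every index holding an element ≤ y.
lemma fSweep_eq (odd : List Int) (y : Int) (hs : odd.Pairwise (· ≤ ·)) :
    ∀ (n : Nat) (p : Int), (p + 1).toNat ≤ n →
      p ≤ (odd.length : Int) - 1 → (cntLE odd y : Int) ≤ p + 1 →
      fSweep odd y n p = (cntLE odd y : Int) - 1 := by
  intro n
  induction n with
  | zero =>
    intro p hm hp hc
    simp only [fSweep]
    omega
  | succ n ih =>
    intro p hm hp hc
    simp only [fSweep]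
    by_cases h0 : 0 ≤ p
    · have hget : PySem.List.pyGetD odd p 0 = odd[p.toNat]'(by omega) :=
        PySem.List.pyGetD_eq_getElem odd 0 h0 (by omega)
      have hchar := sorted_le_iff odd hs y p.toNat (by omega)
      by_cases hcond : y < PySem.List.pyGetD odd p 0
      · simp only [h0, hcond, and_self, if_pos]
        have hge : (cntLE odd y : Int) ≤ p := by
          by_contra hcon
          have : p.toNat < cntLE odd y := by omega
          have := hchar.mpr this
          rw [← hget] at this; omega
        exact ih (p - 1) (by omega) (by omega) (by omega)
      · have : ¬ (0 ≤ p ∧ y < PySem.List.pyGetD odd p 0) := by tauto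
        simp only [this, if_neg, not_false_iff]
        have hlt : (p.toNat : Int) < (cntLE odd y : Int) := by
          exact_mod_cast Int.ofNat_lt.mpr (hchar.mp (by rw [← hget]; omega))
        omega
    · have : ¬ (0 ≤ p ∧ y < PySem.List.pyGetD odd p 0) := by omega
      simp only [this, if_neg, not_false_iff]
      omega

-- The two per-even loop bodies agree, by induction over the sorted even list,
-- carrying B's pointer invariant cntLE odd (k-e-1) ≤ p+1 for all pending e.
lemma fold_eq (odd : List Int) (hs : odd.Pairwise (· ≤ ·)) (k maxm : Int) :
    ∀ (es : List Int), es.Pairwise (· ≤ ·) → ∀ (ans p : Int),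
      p ≤ (odd.length : Int) - 1 →
      (∀ e ∈ es, (cntLE odd (k - e - 1) : Int) ≤ p + 1) →
      (es.foldl (fun (st : Int × Int) e =>
        let y := k - e - 1
        let p := fSweep odd y odd.length st.2
        let ans := if 0 ≤ p then max st.1 (PySem.List.pyGetD odd p 0 + e) else st.1
        let ans := if maxm + e ≥ k then max ans (PySem.Int.mod (e + maxm) k) else ans
        (ans, p)) (ans, p)).1
      = es.foldl (fun ans i =>
        let y := k - i - 1
        let t := fBS odd y odd.length 0 ((odd.length : Int) - 1) (-1)
        let ans := if t ≠ -1 then max ans (PySem.List.pyGetD odd t 0 + i) else ans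
        if maxm + i ≥ k then max ans (PySem.Int.mod (i + maxm) k) else ans) ans := by
  intro es
  induction es with
  | nil => intro _ ans p _ _; simp
  | cons e es' ih =>
    intro hpw ans p hp hinv
    rcases List.pairwise_cons.mp hpw with ⟨he, hes'⟩
    simp only [List.foldl_cons]
    set y := k - e - 1 with hy
    set c := (cntLE odd y : Int) with hcdef
    have hcnn : 0 ≤ c := by positivity
    have hclen : c ≤ (odd.length : Int) := by
      have := List.countP_le_length (l := odd) (p := fun o => decide (o ≤ y))
      simp only [hcdef, cntLE]; exact_mod_cast this
    have hbs : fBS odd y odd.length 0 ((odd.length : Int) - 1) (-1) = c - 1 :=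
      fBS_eq odd y hs odd.length 0 ((odd.length : Int) - 1) (-1)
        (by omega) (by omega) (by omega) (by omega) (by omega) (by omega)
    have hsw : fSweep odd y odd.length p = c - 1 :=
      fSweep_eq odd y hs odd.length p (by omega)
        hp (hinv e List.mem_cons_self)
    simp only [hsw, hbs]
    rw [ih hes' _ _ (by omega) ?_]
    · congr 1
      by_cases hcz : 0 ≤ c - 1
      · rw [if_pos hcz, if_pos (by omega : c - 1 ≠ -1)]
      · rw [if_neg hcz, if_neg (by omega : ¬ c - 1 ≠ -1)]
    · intro e' he'
      have hle : e ≤ e' := he e' he'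
      have hmono : cntLE odd (k - e' - 1) ≤ cntLE odd y := by
        apply List.countP_mono_left
        intro a _ h
        simp only [decide_eq_true_eq] at h ⊢
        omega
      simp only [hcdef] at *
      omega

-- A's partition loop builds exactly (filter even).map (%k), (filter odd).map (%k).
lemma partition_eq (k : Int) (arr : List Int) :
    ∀ acc1 acc2 : List Int,
      arr.foldl (fun (p : List Int × List Int) i =>
        if PySem.Int.mod i 2 = 0 then (p.1 ++ [PySem.Int.mod i k], p.2)
        else (p.1, p.2 ++ [PySem.Int.mod i k])) (acc1, acc2)
      = (acc1 ++ (arr.filter (fun x => PySem.Int.mod x 2 = 0)).map (fun x => PySem.Int.mod x k),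
         acc2 ++ (arr.filter (fun x => ¬ PySem.Int.mod x 2 = 0)).map (fun x => PySem.Int.mod x k)) := by
  induction arr with
  | nil => simp
  | cons a t ih =>
    intro acc1 acc2
    rw [List.foldl_cons]
    by_cases h : PySem.Int.mod a 2 = 0
    · rw [if_pos h, ih,
        List.filter_cons_of_pos (by simpa using h),
        List.filter_cons_of_neg (by simpa using h)]
      simp
    · rw [if_neg h, ih,
        List.filter_cons_of_neg (by simpa using h),
        List.filter_cons_of_pos (by simpa using h)]
      simp

-- ===== VERDICT (by name: the statement is the Claim_ definition above) =====
theorem f_spec : Claim_equal_f := by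
  intro arr k _ _
  unfold Spec_f f f_alt
  simp only
  rw [partition_eq k arr [] []]
  simp only [List.nil_append]
  set eve := PySem.List.sorted ((arr.filter (fun x => PySem.Int.mod x 2 = 0)).map (fun x => PySem.Int.mod x k)) (fun x => x) false with heve
  set odd := PySem.List.sorted ((arr.filter (fun x => ¬ PySem.Int.mod x 2 = 0)).map (fun x => PySem.Int.mod x k)) (fun x => x) false with hodd
  have hso : odd.Pairwise (· ≤ ·) := PySem.List.sorted_pairwise _ _
  have hse : eve.Pairwise (· ≤ ·) := PySem.List.sorted_pairwise _ _
  exact (fold_eq odd hso k (PySem.List.pyGetD odd (-1) 0) eve hse 0 ((odd.length : Int) - 1)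
    (by omega) (fun e _ => by
      have := List.countP_le_length (l := odd) (p := fun o => decide (o ≤ k - e - 1))
      simp only [cntLE]
      omega)).symm
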